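-- pv_equiv track=rewrite | github.com/Lucas-Guimaraes/Reddit-Daily-Programmer | Easy Problems/341-350/343easy.py | note
-- ===== SOURCE A (Python) =====
-- sol_idx = {'Do': 0, 'Re': 1, 'Mi': 2, 'Fa': 3, 'So': 4, 'La': 5, 'Ti': 6}
--
-- chrom_scale = ["C", "C#", "D", "D#", "E", "F", "F#", "G", "G#", "A", "A#", "B"]
--
-- def note(key, sol):
--     idx = sol_idx[sol]
--     cur = chrom_scale.index(key)
--     major_steps = [2, 2, 1, 2, 2, 2, 0]
--     major_lst = []
--     for i in range(7):
--         if cur > 11: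
--             cur -= 12
--         major_lst.append(chrom_scale[cur])
--         cur += major_steps[i]
--         if idx+1 == len(major_lst):
--             return major_lst[-1]
-- ===== SOURCE B (Python) =====
-- sol_idx = {'Do': 0, 'Re': 1, 'Mi': 2, 'Fa': 3, 'So': 4, 'La': 5, 'Ti': 6}
--
-- chrom_scale = ["C", "C#", "D", "D#", "E", "F", "F#", "G", "G#", "A", "A#", "B"]
--
-- # cumulative offsets of the major-scale steps [2,2,1,2,2,2]
-- offsets = (0, 2, 4, 5, 7, 9, 11)
--
-- def note(key, sol):
--     off = offsets[sol_idx[sol]]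
--     return chrom_scale[(chrom_scale.index(key) + off) % 12]
-- ===== Notes on version B (the rewrite author's own statement) =====
-- stated objective: simpler
-- what changed: Replaced the incremental seven-step loop with growing major_lst and wrap-around subtraction by one closed-form lookup chrom_scale[(index(key) + offsets[sol_idx[sol]]) % 12] using a precomputed cumulative-offset table.
import Mathlib
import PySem

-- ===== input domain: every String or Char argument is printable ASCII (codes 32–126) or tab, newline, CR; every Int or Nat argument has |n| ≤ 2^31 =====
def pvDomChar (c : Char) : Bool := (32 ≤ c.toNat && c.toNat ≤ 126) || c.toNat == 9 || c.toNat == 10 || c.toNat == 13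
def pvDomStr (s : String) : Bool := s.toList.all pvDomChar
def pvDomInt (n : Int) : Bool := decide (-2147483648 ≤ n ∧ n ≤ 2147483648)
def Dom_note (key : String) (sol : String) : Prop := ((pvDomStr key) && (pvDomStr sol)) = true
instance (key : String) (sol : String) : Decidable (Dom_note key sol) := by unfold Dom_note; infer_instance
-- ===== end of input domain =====

-- B replaces A's seven-step loop by a closed-form lookup through a cumulative-offset table (objective: simpler).

-- ===== PORT A =====
def solIdx : PySem.Dict String Int :=
  PySem.Dict.ofList [("Do", 0), ("Re", 1), ("Mi", 2), ("Fa", 3), ("So", 4), ("La", 5), ("Ti", 6)]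

def chromScale : List String := ["C", "C#", "D", "D#", "E", "F", "F#", "G", "G#", "A", "A#", "B"]

-- the 'for i in range(7)' loop, recursing over major_steps; none = the KeyError/IndexError/None paths
def noteLoop : List Int → Int → Int → List String → Option String
  | [], _, _, _ => none
  | s :: rest, cur, idx, lst =>
    let cur := if cur > 11 then cur - 12 else cur
    match PySem.List.pyGet? chromScale cur with
    | none => none
    | some n =>
      let lst := lst ++ [n]
      let cur := cur + s
      if idx + 1 = (lst.length : Int) then PySem.List.pyGet? lst (-1)
      else noteLoop rest cur idx lst

def note (key : String) (sol : String) : String :=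
  match PySem.Dict.get? solIdx sol with
  | none => ""            -- Python: KeyError (excluded by Pre_note)
  | some idx =>
    match PySem.List.index? chromScale key with
    | none => ""          -- Python: ValueError (excluded by Pre_note)
    | some cur => (noteLoop [2, 2, 1, 2, 2, 2, 0] (cur : Int) idx []).getD ""

-- ===== PORT B =====
def offsetsB : List Int := [0, 2, 4, 5, 7, 9, 11]

def note_alt (key : String) (sol : String) : String :=
  match PySem.Dict.get? solIdx sol with
  | none => ""            -- Python: KeyError (excluded by Pre_note)
  | some i =>
    match PySem.List.pyGet? offsetsB i with
    | none => ""
    | some off =>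
      match PySem.List.index? chromScale key with
      | none => ""        -- Python: ValueError (excluded by Pre_note)
      | some c => (PySem.List.pyGet? chromScale (PySem.Int.mod ((c : Int) + off) 12)).getD ""

-- ===== PRECONDITION & SPEC =====
-- Pre_note: exactly the inputs on which A returns (sol a solfège name, key a chromatic note); otherwise A raises.
def Pre_note (key : String) (sol : String) : Prop :=
  sol ∈ ["Do", "Re", "Mi", "Fa", "So", "La", "Ti"] ∧ key ∈ chromScale

instance (key : String) (sol : String) : Decidable (Pre_note key sol) := by
  unfold Pre_note; infer_instance

def pvWitness_note : String × String := ("C", "Do")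

def Spec_note (key : String) (sol : String) (out : String) : Prop := out = note_alt key sol
instance (key : String) (sol : String) (out : String) : Decidable (Spec_note key sol out) := by unfold Spec_note; infer_instance

-- ===== CLAIM (what is proved, stated in full; the proofs are below) =====
def Claim_equal_note : Prop := ∀ (key : String) (sol : String), Dom_note key sol → Pre_note key sol → Spec_note key sol (note key sol)

-- ===== LEMMAS AND PROOFS =====

-- ===== VERDICT (by name: the statement is the Claim_ definition above) =====
theorem note_spec : Claim_equal_note := by
  intro key sol _ hpre
  obtain ⟨hs, hk⟩ := hpre
  unfold chromScale at hk
  simp only [List.mem_cons, List.not_mem_nil, or_false] at hs hk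
  rcases hs with rfl | rfl | rfl | rfl | rfl | rfl | rfl <;>
    rcases hk with rfl | rfl | rfl | rfl | rfl | rfl | rfl | rfl | rfl | rfl | rfl | rfl <;>
    decide
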